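-- pv_equiv track=rewrite | github.com/mooyeon-choi/TIL | problemSolving/programmers/level_4_python/지형편집.py | solution
-- ===== SOURCE A (Python) =====
-- def solution(land, P, Q):
--     nums = {}
--     for i in range(len(land)):
--         for j in range(len(land)):
--             if land[i][j] not in nums:
--                 nums[land[i][j]] = 1
--             else:
--                 nums[land[i][j]] += 1
--
--     pivots = sorted(nums.keys())
--     p = nums[pivots[0]]
--     q = sum(nums.values()) - nums[pivots[0]]
--     before = pivots[0]
--     result = 0
--     for key, value in sorted(nums.items()):
--         result += (key - pivots[0]) * Q * value
--     answer = result
--     for i in range(1, len(pivots)):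
--         result -= (pivots[i] - before) * Q * q
--         result += (pivots[i] - before) * P * p
--         before = pivots[i]
--         p += nums[pivots[i]]
--         q -= nums[pivots[i]]
--         if result < answer:
--             answer = result
--
--     return answer
-- ===== SOURCE B (Python) =====
-- def solution(land, P, Q):
--     n = len(land)
--     cnt = {}
--     for i in range(n):
--         for j in range(n):
--             h = land[i][j]
--             cnt[h] = cnt.get(h, 0) + 1
--     return min(sum((k - h) * Q * c if k >= h else (h - k) * P * c
--                    for k, c in cnt.items())
--                for h in cnt)
-- ===== Notes on version B (the rewrite author's own statement) =====
-- stated objective: simpler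
-- what changed: B replaces A's O(1) incremental sliding update of the cost along the sorted distinct heights (maintaining running result/p/q accumulators) by a direct per-candidate recomputation: for each distinct height h it sums (k-h)*Q*c for k>=h and (h-k)*P*c for k<h over the height counts and takes the minimum.
import Mathlib
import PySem

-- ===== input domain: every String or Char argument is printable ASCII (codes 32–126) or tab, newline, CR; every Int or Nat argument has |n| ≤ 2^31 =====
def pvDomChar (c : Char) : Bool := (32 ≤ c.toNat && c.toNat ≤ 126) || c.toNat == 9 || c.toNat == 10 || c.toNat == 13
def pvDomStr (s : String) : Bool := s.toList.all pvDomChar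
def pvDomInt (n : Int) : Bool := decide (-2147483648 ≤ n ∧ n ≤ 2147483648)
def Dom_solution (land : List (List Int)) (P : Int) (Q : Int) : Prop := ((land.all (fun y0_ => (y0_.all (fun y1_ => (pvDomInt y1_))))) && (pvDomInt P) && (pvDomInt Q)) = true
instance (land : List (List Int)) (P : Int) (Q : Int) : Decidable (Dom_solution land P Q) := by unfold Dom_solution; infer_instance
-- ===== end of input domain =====

-- B replaces A's incremental sliding-cost update along the sorted distinct heights by a direct
-- per-candidate recomputation of the leveling cost and a plain minimum (objective: simpler; not faster).

-- ===== PORT A =====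
-- the height-count dict of A's double counting loop ('if x not in nums: nums[x]=1 else: nums[x]+=1')
def countA (land : List (List Int)) : PySem.Dict Int Int :=
  (PySem.List.pyRange 0 (PySem.List.len land)).foldl (fun d i =>
    (PySem.List.pyRange 0 (PySem.List.len land)).foldl (fun d j =>
      let x := PySem.List.pyGetD (PySem.List.pyGetD land i []) j 0
      if d.contains x then d.insert x (d.getD x 0 + 1) else d.insert x 1) d)
    PySem.Dict.empty

-- one iteration of A's second loop; the state is (result, answer, before, p, q)
def stepA (nums : PySem.Dict Int Int) (P : Int) (Q : Int)
    (s : Int × Int × Int × Int × Int) (h : Int) : Int × Int × Int × Int × Int :=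
  let result := s.1 - (h - s.2.2.1) * Q * s.2.2.2.2
  let result := result + (h - s.2.2.1) * P * s.2.2.2.1
  let answer := if result < s.2.1 then result else s.2.1
  (result, answer, h, s.2.2.2.1 + nums.getD h 0, s.2.2.2.2 - nums.getD h 0)

def solution (land : List (List Int)) (P : Int) (Q : Int) : Int :=
  let nums := countA land
  let pivots := PySem.List.sorted nums.keys (fun k => k)
  let piv0 := PySem.List.pyGetD pivots 0 0          -- pivots[0] (Pre_ guarantees nonempty)
  let p := nums.getD piv0 0
  let q := nums.values.sum - nums.getD piv0 0
  let result := (PySem.List.sorted2 nums.items (fun kv => kv.1) (fun kv => kv.2)).foldl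
    (fun r kv => r + (kv.1 - piv0) * Q * kv.2) 0
  let st := (PySem.List.pyRange 1 (PySem.List.len pivots)).foldl
    (fun s i => stepA nums P Q s (PySem.List.pyGetD pivots i 0))
    (result, result, piv0, p, q)
  st.2.1

-- ===== PORT B =====
-- the height-count dict of B's counting loop ('cnt[h] = cnt.get(h, 0) + 1')
def countB (land : List (List Int)) : PySem.Dict Int Int :=
  (PySem.List.pyRange 0 (PySem.List.len land)).foldl (fun d i =>
    (PySem.List.pyRange 0 (PySem.List.len land)).foldl (fun d j =>
      let h := PySem.List.pyGetD (PySem.List.pyGetD land i []) j 0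
      d.insert h (d.getD h 0 + 1)) d)
    PySem.Dict.empty

def solution_alt (land : List (List Int)) (P : Int) (Q : Int) : Int :=
  let cnt := countB land
  match PySem.List.min?
      (cnt.keys.map (fun h =>
        (cnt.items.map (fun kc =>
          if kc.1 ≥ h then (kc.1 - h) * Q * kc.2 else (h - kc.1) * P * kc.2)).sum))
      (fun x => x) with
  | some m => m
  | none => 0        -- unreachable under Pre_ (Python's min raises ValueError there)

-- ===== PRECONDITION & SPEC =====
-- Pre_ excludes exactly the inputs on which A raises: empty land (IndexError on pivots[0]) and a row
-- shorter than len(land) (IndexError while indexing land[i][j]); B raises on those inputs too.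
def Pre_solution (land : List (List Int)) (P : Int) (Q : Int) : Prop :=
  land ≠ [] ∧ ∀ row ∈ land, land.length ≤ row.length
instance (land : List (List Int)) (P : Int) (Q : Int) : Decidable (Pre_solution land P Q) := by
  unfold Pre_solution; infer_instance
def pvWitness_solution : List (List Int) × Int × Int := ([[1, 2], [3, 1]], 2, 3)

def Spec_solution (land : List (List Int)) (P : Int) (Q : Int) (out : Int) : Prop := out = solution_alt land P Q
instance (land : List (List Int)) (P : Int) (Q : Int) (out : Int) : Decidable (Spec_solution land P Q out) := by unfold Spec_solution; infer_instance

-- ===== CLAIM (what is proved, stated in full; the proofs are below) =====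
def Claim_equal_solution : Prop := ∀ (land : List (List Int)) (P : Int) (Q : Int), Dom_solution land P Q → Pre_solution land P Q → Spec_solution land P Q (solution land P Q)

-- ===== LEMMAS AND PROOFS =====

-- B's per-item cost term and per-candidate total cost (the body of solution_alt's sums)
def fvalB (P Q h : Int) (kc : Int × Int) : Int :=
  if kc.1 ≥ h then (kc.1 - h) * Q * kc.2 else (h - kc.1) * P * kc.2

def costOf (d : PySem.Dict Int Int) (P Q h : Int) : Int := (d.items.map (fvalB P Q h)).sum

-- total count of heights ≤ b (resp. ≥ b) in an items list
def sLE (items : List (Int × Int)) (b : Int) : Int :=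
  (items.map (fun kc => if kc.1 ≤ b then kc.2 else 0)).sum

def sGE (items : List (Int × Int)) (b : Int) : Int :=
  (items.map (fun kc => if b ≤ kc.1 then kc.2 else 0)).sum

lemma cost_step (P Q b h : Int) (hbh : b < h) :
    ∀ (items : List (Int × Int)), (∀ kc ∈ items, kc.1 ≤ b ∨ h ≤ kc.1) →
    (items.map (fvalB P Q h)).sum
      = (items.map (fvalB P Q b)).sum - (h - b) * Q * sGE items h + (h - b) * P * sLE items b := by
  intro items
  induction items with
  | nil => intro _; simp [sLE, sGE]
  | cons kc t ih =>
    intro hcov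
    obtain ⟨k, v⟩ := kc
    have hk := hcov (k, v) (List.mem_cons_self ..)
    have iht := ih (fun x hx => hcov x (List.mem_cons_of_mem _ hx))
    simp only [fvalB, sLE, sGE, List.map_cons, List.sum_cons] at iht ⊢
    rw [iht]
    split_ifs <;>
      first
        | ring1
        | (exfalso; omega)
        | (rw [show k = b by omega]; ring1)

lemma partition (b h : Int) (hbh : b < h) :
    ∀ (items : List (Int × Int)), (∀ kc ∈ items, kc.1 ≤ b ∨ h ≤ kc.1) →
    (items.map (fun kc => kc.2)).sum = sLE items b + sGE items h := by
  intro items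
  induction items with
  | nil => intro _; simp [sLE, sGE]
  | cons kc t ih =>
    intro hcov
    obtain ⟨k, v⟩ := kc
    have hk := hcov (k, v) (List.mem_cons_self ..)
    have iht := ih (fun x hx => hcov x (List.mem_cons_of_mem _ hx))
    simp only [sLE, sGE, List.map_cons, List.sum_cons] at iht ⊢
    rw [iht]
    split_ifs <;> omega

lemma sum_if_eq_key :
    ∀ (items : List (Int × Int)) (h c : Int), (items.map (fun kc => kc.1)).Nodup → (h, c) ∈ items →
    (items.map (fun kc => if kc.1 = h then kc.2 else 0)).sum = c := by
  intro items
  induction items with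
  | nil => intro h c _ hmem; cases hmem
  | cons a t ih =>
    intro h c hnd hmem
    obtain ⟨k, v⟩ := a
    rw [List.map_cons] at hnd
    have hnd' := List.nodup_cons.mp hnd
    simp only [List.map_cons, List.sum_cons]
    rcases List.mem_cons.mp hmem with heq | hmem'
    · obtain ⟨rfl, rfl⟩ := Prod.mk.injEq .. ▸ heq.symm
      have hz : (t.map (fun kc => if kc.1 = k then kc.2 else 0)).sum = 0 := by
        apply List.sum_eq_zero
        intro x hx
        obtain ⟨kc, hkc, rfl⟩ := List.mem_map.mp hx
        have hne : kc.1 ≠ k := by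
          intro e
          have hmm : kc.1 ∈ t.map (fun kc => kc.1) := List.mem_map_of_mem hkc
          exact hnd'.1 (e ▸ hmm)
        simp [hne]
      simp [hz]
    · have hane : k ≠ h := by
        intro e
        have hmm : (h, c).1 ∈ t.map (fun kc => kc.1) := List.mem_map_of_mem hmem'
        exact hnd'.1 (e ▸ hmm)
      rw [if_neg hane, ih h c hnd'.2 hmem']
      omega

lemma sLE_step (b h : Int) (hbh : b < h) :
    ∀ (items : List (Int × Int)), (∀ kc ∈ items, kc.1 ≤ b ∨ h ≤ kc.1) →
    (items.map (fun kc => kc.1)).Nodup → ∀ c, (h, c) ∈ items →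
    sLE items h = sLE items b + c := by
  intro items hcov hnd c hmem
  have hpt : ∀ kc ∈ items, (if kc.1 ≤ h then kc.2 else (0:Int))
      = (if kc.1 ≤ b then kc.2 else 0) + (if kc.1 = h then kc.2 else 0) := by
    intro kc hkc
    obtain ⟨k, v⟩ := kc
    rcases hcov (k, v) hkc with h1 | h1 <;> split_ifs <;> omega
  unfold sLE
  rw [List.map_congr_left hpt, PySem.List.sum_map_add_int, sum_if_eq_key items h c hnd hmem]

-- min over Int written as Python's 'if result < answer' update
lemma if_lt_eq_min (a c : Int) : (if c < a then c else a) = min a c := by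
  simp only [min_def]; split_ifs <;> omega

-- invariant of A's second loop: walking the remaining sorted pivots with state
-- (result = cost of the previous pivot, answer, before, p = count ≤ before, q = total - p)
-- computes the running minimum of the per-pivot costs
lemma loopA (d : PySem.Dict Int Int) (P Q : Int) (hnd : d.keys.Nodup) :
    ∀ (rest : List Int) (before ans : Int),
      before ∈ d.keys →
      (∀ k ∈ d.keys, k ≤ before ∨ k ∈ rest) →
      (before :: rest).Pairwise (· < ·) →
      (∀ k ∈ rest, k ∈ d.keys) →
      (rest.foldl (stepA d P Q)
        (costOf d P Q before, ans, before, sLE d.items before,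
          (d.items.map (fun kc => kc.2)).sum - sLE d.items before)).2.1
        = (rest.map (costOf d P Q)).foldl min ans := by
  intro rest
  induction rest with
  | nil => intros; rfl
  | cons h t ih =>
    intro before ans hbmem hcov hpw htmem
    have hpwc := List.pairwise_cons.mp hpw
    have hbh : before < h := hpwc.1 h (List.mem_cons_self ..)
    have hhK : h ∈ d.keys := htmem h (List.mem_cons_self ..)
    have hpw' : (h :: t).Pairwise (· < ·) := hpwc.2
    have hpwc' := List.pairwise_cons.mp hpw'
    have hcov' : ∀ kc ∈ d.items, kc.1 ≤ before ∨ h ≤ kc.1 := by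
      intro kc hkc
      rcases hcov _ (PySem.Dict.mem_keys_of_mem_items d hkc) with h1 | h1
      · exact Or.inl h1
      · rcases List.mem_cons.mp h1 with rfl | h2
        · exact Or.inr le_rfl
        · exact Or.inr (le_of_lt (hpwc'.1 _ h2))
    have hcov2 : ∀ k ∈ d.keys, k ≤ h ∨ k ∈ t := by
      intro k hkK
      rcases hcov _ hkK with h1 | h1
      · exact Or.inl (le_trans h1 (le_of_lt hbh))
      · rcases List.mem_cons.mp h1 with rfl | h2
        · exact Or.inl le_rfl
        · exact Or.inr h2
    have hndi : (d.items.map (fun kc => kc.1)).Nodup := hnd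
    have hhc : (h, d.getD h 0) ∈ d.items := by
      rw [PySem.Dict.items_eq_map_keys d hnd 0]
      exact List.mem_map_of_mem hhK
    have e2 : sLE d.items h = sLE d.items before + d.getD h 0 :=
      sLE_step before h hbh d.items hcov' hndi _ hhc
    have e1 : costOf d P Q before
        - (h - before) * Q * ((d.items.map (fun kc => kc.2)).sum - sLE d.items before)
        + (h - before) * P * sLE d.items before = costOf d P Q h := by
      have hpart := partition before h hbh d.items hcov'
      have hcs := cost_step P Q before h hbh d.items hcov'
      have hq : (d.items.map (fun kc => kc.2)).sum - sLE d.items before = sGE d.items h := by omega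
      rw [hq]
      unfold costOf
      exact hcs.symm
    have hstep : stepA d P Q
        (costOf d P Q before, ans, before, sLE d.items before,
          (d.items.map (fun kc => kc.2)).sum - sLE d.items before) h
        = (costOf d P Q h, min ans (costOf d P Q h), h, sLE d.items h,
          (d.items.map (fun kc => kc.2)).sum - sLE d.items h) := by
      have e3 : (d.items.map (fun kc => kc.2)).sum - sLE d.items before - d.getD h 0
          = (d.items.map (fun kc => kc.2)).sum - sLE d.items h := by omega
      simp only [stepA]
      rw [e1, if_lt_eq_min, e3, ← e2]
    rw [List.foldl_cons, hstep]
    simp only [List.map_cons, List.foldl_cons]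
    exact ih h (min ans (costOf d P Q h)) hhK hcov2 hpw' (fun k hk => htmem k (List.mem_cons_of_mem _ hk))

-- the grid values in A's/B's traversal order, flattened
def keyAt (land : List (List Int)) (i j : Int) : Int :=
  PySem.List.pyGetD (PySem.List.pyGetD land i []) j 0

def flatL (land : List (List Int)) : List Int :=
  ((PySem.List.pyRange 0 (PySem.List.len land)).map (fun i =>
    (PySem.List.pyRange 0 (PySem.List.len land)).map (fun j => keyAt land i j))).flatten

lemma countB_eq_flat (land : List (List Int)) :
    countB land = (flatL land).foldl (fun d x => d.insert x (d.getD x 0 + 1)) PySem.Dict.empty := by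
  unfold flatL
  rw [List.foldl_flatten, List.foldl_map]
  simp only [List.foldl_map]
  rfl

lemma countA_eq_countB (land : List (List Int)) : countA land = countB land := by
  have step_eq : ∀ (d : PySem.Dict Int Int) (x : Int),
      (if d.contains x then d.insert x (d.getD x 0 + 1) else d.insert x 1)
        = d.insert x (d.getD x 0 + 1) := by
    intro d x
    by_cases hc : d.contains x = true
    · simp [hc]
    · have hg : d.getD x 0 = 0 := PySem.Dict.getD_of_not_contains d 0 (by simpa using hc)
      simp [hc, hg]
  simp only [countA, countB, step_eq]

lemma nodup_keys_countB (land : List (List Int)) : (countB land).keys.Nodup := by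
  rw [countB_eq_flat]
  exact PySem.Dict.nodup_keys_foldl_insert _ (fun d x => d.getD x 0 + 1) _ PySem.Dict.nodup_keys_empty

lemma keys_countB_ne_nil (land : List (List Int)) (hne : land ≠ []) : (countB land).keys ≠ [] := by
  have hlen : (0:Int) < PySem.List.len land := by
    have h0 : 0 < land.length := List.length_pos_of_ne_nil hne
    rw [show PySem.List.len land = (land.length : Int) from rfl]
    exact_mod_cast h0
  have hmem : keyAt land 0 0 ∈ flatL land := by
    unfold flatL
    apply List.mem_flatten.mpr
    refine ⟨(PySem.List.pyRange 0 (PySem.List.len land)).map (fun j => keyAt land 0 j), ?_, ?_⟩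
    · exact List.mem_map_of_mem (PySem.List.mem_pyRange_one.mpr ⟨le_refl 0, hlen⟩)
    · exact List.mem_map_of_mem (PySem.List.mem_pyRange_one.mpr ⟨le_refl 0, hlen⟩)
  rw [countB_eq_flat, PySem.Dict.keys_foldl_insert]
  apply List.ne_nil_of_mem (a := keyAt land 0 0)
  show keyAt land 0 0 ∈ PySem.Set.update PySem.Dict.empty.keys (flatL land)
  rw [show PySem.Set.update (PySem.Dict.empty (κ := Int) (ν := Int)).keys (flatL land)
      = PySem.Set.ofList (flatL land) from rfl]
  exact (PySem.Set.mem_ofList _ _).mpr hmem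

-- ===== VERDICT (by name: the statement is the Claim_ definition above) =====
theorem solution_spec : Claim_equal_solution := by
  intro land P Q _ hpre
  obtain ⟨hne, -⟩ := hpre
  unfold Spec_solution
  simp only [solution, solution_alt, countA_eq_countB]
  have hnd : (countB land).keys.Nodup := nodup_keys_countB land
  have hKne : (countB land).keys ≠ [] := keys_countB_ne_nil land hne
  have hperm : (PySem.List.sorted (countB land).keys (fun k => k)).Perm (countB land).keys :=
    PySem.List.sorted_perm _ _ false
  obtain ⟨piv0, tl, hcons⟩ : ∃ a t, PySem.List.sorted (countB land).keys (fun k => k) = a :: t := by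
    cases hp : PySem.List.sorted (countB land).keys (fun k => k) with
    | nil => exact absurd ((PySem.List.sorted_eq_nil_iff _ _ _).mp hp) hKne
    | cons a t => exact ⟨a, t, rfl⟩
  rw [hcons]
  rw [show PySem.List.pyGetD (piv0 :: tl) 0 0 = piv0 by simp [PySem.List.pyGetD]]
  rw [PySem.List.foldl_pyRange_pyGetD (piv0 :: tl) 0 (stepA (countB land) P Q) _
    (by norm_num : (0:Int) ≤ 1)]
  rw [show ((1:Int).toNat) = 1 from rfl, List.drop_succ_cons, List.drop_zero]
  -- order facts about the sorted pivot list
  have hple : (piv0 :: tl).Pairwise (fun a b : Int => a ≤ b) := by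
    have h := PySem.List.sorted_pairwise (countB land).keys (fun k : Int => k)
    rw [hcons] at h
    exact h
  have hpermc : (piv0 :: tl).Perm (countB land).keys := hcons ▸ hperm
  have hmin : ∀ k ∈ (countB land).keys, piv0 ≤ k := by
    intro k hk
    rcases List.mem_cons.mp (hpermc.mem_iff.mpr hk) with rfl | hk'
    · exact le_rfl
    · exact (List.pairwise_cons.mp hple).1 k hk'
  have hpiv0K : piv0 ∈ (countB land).keys := hpermc.mem_iff.mp (List.mem_cons_self ..)
  have htlK : ∀ k ∈ tl, k ∈ (countB land).keys :=
    fun k hk => hpermc.mem_iff.mp (List.mem_cons_of_mem _ hk)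
  have hcov : ∀ k ∈ (countB land).keys, k ≤ piv0 ∨ k ∈ tl := by
    intro k hk
    rcases List.mem_cons.mp (hpermc.mem_iff.mpr hk) with rfl | hk'
    · exact Or.inl le_rfl
    · exact Or.inr hk'
  have hpltc : (piv0 :: tl).Pairwise (· < ·) := by
    have hnodup : (piv0 :: tl).Nodup := hpermc.nodup_iff.mpr hnd
    exact (hple.and hnodup).imp (fun hab => lt_of_le_of_ne hab.1 hab.2)
  have hitems : (countB land).items
      = (countB land).keys.map (fun k => (k, (countB land).getD k 0)) :=
    PySem.Dict.items_eq_map_keys _ hnd 0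
  have hmemI : (piv0, (countB land).getD piv0 0) ∈ (countB land).items := by
    rw [hitems]
    exact List.mem_map_of_mem hpiv0K
  have hminI : ∀ kc ∈ (countB land).items, piv0 ≤ kc.1 :=
    fun kc hkc => hmin _ (PySem.Dict.mem_keys_of_mem_items _ hkc)
  -- the initial accumulators of A's second loop
  have hmapeq : (countB land).items.map (fun kv => (kv.1 - piv0) * Q * kv.2)
      = (countB land).items.map (fvalB P Q piv0) := by
    apply List.map_congr_left
    intro kc hkc
    have hge := hminI kc hkc
    simp only [fvalB]
    rw [if_pos (by omega : kc.1 ≥ piv0)]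
  have hresult : (List.foldl (fun r kv => r + (kv.1 - piv0) * Q * kv.2) 0
      (PySem.List.sorted2 (countB land).items (fun kv => kv.1) fun kv => kv.2))
      = costOf (countB land) P Q piv0 := by
    rw [PySem.List.foldl_add, zero_add,
      List.Perm.sum_eq ((PySem.List.sorted2_perm _ _ _ _).map _), hmapeq]
    rfl
  have hp0 : (countB land).getD piv0 0 = sLE (countB land).items piv0 := by
    unfold sLE
    have hpt : ∀ kc ∈ (countB land).items,
        (if kc.1 ≤ piv0 then kc.2 else (0:Int)) = (if kc.1 = piv0 then kc.2 else 0) := by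
      intro kc hkc
      have hge := hminI kc hkc
      split_ifs <;> omega
    rw [List.map_congr_left hpt]
    exact (sum_if_eq_key _ piv0 _ hnd hmemI).symm
  have hq0 : (countB land).values.sum = ((countB land).items.map (fun kc => kc.2)).sum := rfl
  rw [hresult, hp0, hq0,
    loopA (countB land) P Q hnd tl piv0 (costOf (countB land) P Q piv0) hpiv0K hcov hpltc htlK]
  -- B's side: its minimum is characterised as the least element of the same cost multiset
  have hBfun : (fun h => (List.map
        (fun kc => if kc.1 ≥ h then (kc.1 - h) * Q * kc.2 else (h - kc.1) * P * kc.2)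
        (countB land).items).sum) = costOf (countB land) P Q := rfl
  rw [hBfun]
  cases hm : PySem.List.min? ((countB land).keys.map (costOf (countB land) P Q)) (fun x => x) with
  | none =>
    exact absurd (List.map_eq_nil_iff.mp ((PySem.List.min?_eq_none_iff _ _).mp hm)) hKne
  | some m =>
    have hmL : m ∈ (countB land).keys.map (costOf (countB land) P Q) := PySem.List.min?_mem hm
    have hmlb : ∀ y ∈ (countB land).keys.map (costOf (countB land) P Q), m ≤ y :=
      PySem.List.min?_isMin hm
    have hpermL : ((piv0 :: tl).map (costOf (countB land) P Q)).Perm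
        ((countB land).keys.map (costOf (countB land) P Q)) := hpermc.map _
    have hAmem : (tl.map (costOf (countB land) P Q)).foldl min (costOf (countB land) P Q piv0)
        ∈ (piv0 :: tl).map (costOf (countB land) P Q) := by
      rcases PySem.List.foldl_min_mem (tl.map (costOf (countB land) P Q))
          (costOf (countB land) P Q piv0) with h | h
      · rw [List.map_cons, h]
        exact List.mem_cons_self ..
      · rw [List.map_cons]
        exact List.mem_cons_of_mem _ h
    have hAlb : ∀ y ∈ (piv0 :: tl).map (costOf (countB land) P Q),
        (tl.map (costOf (countB land) P Q)).foldl min (costOf (countB land) P Q piv0) ≤ y := by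
      intro y hy
      rw [List.map_cons] at hy
      rcases List.mem_cons.mp hy with rfl | hy'
      · exact (PySem.List.foldl_min_le _ _).1
      · exact (PySem.List.foldl_min_le _ _).2 y hy'
    have h1 : m ≤ (tl.map (costOf (countB land) P Q)).foldl min (costOf (countB land) P Q piv0) :=
      hmlb _ (hpermL.mem_iff.mp hAmem)
    have h2 : (tl.map (costOf (countB land) P Q)).foldl min (costOf (countB land) P Q piv0) ≤ m :=
      hAlb m (hpermL.mem_iff.mpr hmL)
    exact le_antisymm h2 h1
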